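-- pv_equiv track=rewrite | github.com/poksiala/bsqf | elements/line.py | divide_into_segments
-- ===== SOURCE A (Python) =====
-- def divide_into_segments(string: str) -> list:
--     """Divide string to segments
--
--     Method divides given string to logical code segments
--     starting from left to right.
--
--     example: '"asd"+(random(1,5) == var123)'
--     would produce: ", asd, ", +, (, random, (, 1, 5, ), ==, var123, )
--
--     :param string: str
--     :return: list
--     """
--     # TODO: use regular expressions
--     operators = ["=", "!", "<", ">", "|", "&", "+", "-"]
--     segment_list = []
--     looking_for = None
--     start = -1
--     end = False
--     for i in range(len(string)):
--         if looking_for == "int":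
--             if not string[i].isdigit() and string[i] != ".":
--                 end = i
--         if looking_for == "str":
--             if not string[i].isalnum():
--                 end = i
--         if looking_for == "operator":
--             if not string[i] in operators:
--                 end = i
--         elif looking_for == "pass":
--             end = i
--
--         if end:
--             segment = string[start: end]
--             segment_list.append(segment)
--             end = False
--             looking_for = None
--
--         if looking_for is None:
--             start = i
--             if string[i].isspace() or string[i] == ",":
--                 start = -1
--             elif string[i].isdigit():
--                 looking_for = "int"
--             elif string[i].isalpha() or string[i] in [".", "_"]:
--                 looking_for = "str"
--             elif string[i] in operators:
--                 looking_for = "operator"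
--             else:
--                 looking_for = "pass"
--
--     if looking_for is not None:
--         segment_list.append(string[start:])
--     return segment_list
-- ===== SOURCE B (Python) =====
-- def divide_into_segments(string: str) -> list:
--     """Maximal-munch tokenizer: index-based while loop emitting each token span directly."""
--     ops = "=!<>|&+-"
--     out = []
--     i, n = 0, len(string)
--     while i < n:
--         c = string[i]
--         if c.isspace() or c == ",":
--             i += 1
--             continue
--         start = i
--         i += 1
--         if c.isdigit():
--             while i < n and (string[i].isdigit() or string[i] == "."):
--                 i += 1
--         elif c.isalpha() or c in "._":
--             while i < n and string[i].isalnum():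
--                 i += 1
--         elif c in ops:
--             while i < n and string[i] in ops:
--                 i += 1
--         out.append(string[start:i])
--     return out
-- ===== Notes on version B (the rewrite author's own statement) =====
-- stated objective: simpler
-- what changed: Replaced A's per-character state machine with looking_for/start/end bookkeeping by an index-based maximal-munch while loop that consumes each whole token span and emits it directly.
import Mathlib
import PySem

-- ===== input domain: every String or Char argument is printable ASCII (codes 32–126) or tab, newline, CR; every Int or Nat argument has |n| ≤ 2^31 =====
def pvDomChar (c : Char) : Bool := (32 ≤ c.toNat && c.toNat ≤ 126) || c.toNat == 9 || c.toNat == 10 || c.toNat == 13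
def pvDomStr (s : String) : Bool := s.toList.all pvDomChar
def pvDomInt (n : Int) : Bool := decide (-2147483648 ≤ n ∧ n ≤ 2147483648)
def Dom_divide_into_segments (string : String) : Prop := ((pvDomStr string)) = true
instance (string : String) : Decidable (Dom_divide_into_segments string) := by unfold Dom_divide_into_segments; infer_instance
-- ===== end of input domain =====

-- B replaces A's per-character state machine (looking_for/start/end flags) with an index-based
-- maximal-munch while loop that emits each token span directly; objective: simpler (same cost).

-- ===== PORT A =====
-- A's operator list
def pvOps : List Char := ['=', '!', '<', '>', '|', '&', '+', '-']

-- one iteration of A's for-loop; state = (segment_list, looking_for, start, end)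
-- Python's `end` starts as False and `if end:` tests truthiness; False == 0 in Python,
-- so `end` is ported as an Int (False ↦ 0) and the test as `end ≠ 0` — numerically exact.
def pvAStep (cs : List Char) (st : List String × Option String × Int × Int) (i : Int) :
    List String × Option String × Int × Int :=
  let segs := st.1
  let looking := st.2.1
  let start := st.2.2.1
  let endv := st.2.2.2
  let c := PySem.List.pyGetD cs i ' '
  let endv := if looking = some "int" ∧ ¬(PySem.Chars.isdigit c = true ∨ c = '.') then i else endv
  let endv := if looking = some "str" ∧ ¬(PySem.Chars.isalnum c = true) then i else endv
  let endv :=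
    if looking = some "operator" then (if ¬(pvOps.contains c = true) then i else endv)
    else if looking = some "pass" then i else endv
  let segs := if endv ≠ 0 then segs ++ [String.ofList (PySem.List.slice cs (some start) (some endv))] else segs
  let looking : Option String := if endv ≠ 0 then none else looking
  let endv : Int := if endv ≠ 0 then 0 else endv
  if looking = none then
    if PySem.Chars.isspace c = true ∨ c = ',' then (segs, none, -1, endv)
    else if PySem.Chars.isdigit c = true then (segs, some "int", i, endv)
    else if PySem.Chars.isalpha c = true ∨ c = '.' ∨ c = '_' then (segs, some "str", i, endv)
    else if pvOps.contains c = true then (segs, some "operator", i, endv)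
    else (segs, some "pass", i, endv)
  else (segs, looking, start, endv)

def divide_into_segments (string : String) : List String :=
  let cs := string.toList
  let st := (PySem.List.pyRange 0 cs.length).foldl (pvAStep cs) ([], none, -1, 0)
  if st.2.1 ≠ none then st.1 ++ [String.ofList (PySem.List.slice cs (some st.2.2.1) none)] else st.1

-- ===== PORT B =====
-- `while i < n and p(string[i]): i += 1` — returns the final i
def pvMunch (p : Char → Bool) (cs : List Char) (i : Nat) : Nat :=
  if h : i < cs.length then (if p cs[i] then pvMunch p cs (i + 1) else i) else i
termination_by cs.length - i

theorem pvMunch_ge (p : Char → Bool) (cs : List Char) (i : Nat) : i ≤ pvMunch p cs i := by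
  unfold pvMunch
  split
  · split
    · exact le_trans (Nat.le_succ i) (pvMunch_ge p cs (i + 1))
    · exact le_refl i
  · exact le_refl i
termination_by cs.length - i

-- B's outer while loop
def pvBLoop (cs : List Char) (i : Nat) : List String :=
  if h : i < cs.length then
    let c := cs[i]
    if PySem.Chars.isspace c || c = ',' then pvBLoop cs (i + 1)
    else
      let j :=
        if PySem.Chars.isdigit c then pvMunch (fun d => PySem.Chars.isdigit d || d = '.') cs (i + 1)
        else if PySem.Chars.isalpha c || c = '.' || c = '_' then pvMunch PySem.Chars.isalnum cs (i + 1)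
        else if pvOps.contains c then pvMunch (fun d => pvOps.contains d) cs (i + 1)
        else i + 1
      String.ofList (PySem.List.slice cs (some (i : Int)) (some (j : Int))) :: pvBLoop cs j
  else []
termination_by cs.length - i
decreasing_by
  · omega
  · have h1 := pvMunch_ge (fun d => PySem.Chars.isdigit d || d = '.') cs (i + 1)
    have h2 := pvMunch_ge PySem.Chars.isalnum cs (i + 1)
    have h3 := pvMunch_ge (fun d => pvOps.contains d) cs (i + 1)
    split_ifs <;> omega

def divide_into_segments_alt (string : String) : List String :=
  pvBLoop string.toList 0

-- ===== PRECONDITION & SPEC =====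
def Spec_divide_into_segments (string : String) (out : List String) : Prop := out = divide_into_segments_alt string
instance (string : String) (out : List String) : Decidable (Spec_divide_into_segments string out) := by unfold Spec_divide_into_segments; infer_instance

-- ===== CLAIM (what is proved, stated in full; the proofs are below) =====
def Claim_equal_divide_into_segments : Prop := ∀ (string : String), Dom_divide_into_segments string → Spec_divide_into_segments string (divide_into_segments string)

-- ===== LEMMAS AND PROOFS =====

-- A's fold from position i onwards, followed by A's final tail-append
def pvRunA (cs : List Char) (i : Nat) (st : List String × Option String × Int × Int) : List String :=
  let st := (PySem.List.pyRange i cs.length).foldl (pvAStep cs) st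
  if st.2.1 ≠ none then st.1 ++ [String.ofList (PySem.List.slice cs (some st.2.2.1) none)] else st.1

theorem pvRunA_stop (cs : List Char) (i : Nat) (h : ¬ i < cs.length)
    (st : List String × Option String × Int × Int) : pvRunA cs i st =
      (if st.2.1 ≠ none then st.1 ++ [String.ofList (PySem.List.slice cs (some st.2.2.1) none)] else st.1) := by
  unfold pvRunA
  rw [PySem.List.pyRange_one_eq_nil (by exact_mod_cast Nat.le_of_not_lt h)]
  rfl

theorem pvRunA_cons (cs : List Char) (i : Nat) (h : i < cs.length)
    (st : List String × Option String × Int × Int) :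
    pvRunA cs i st = pvRunA cs (i + 1) (pvAStep cs st (i : Int)) := by
  unfold pvRunA
  rw [PySem.List.pyRange_one_cons (by exact_mod_cast h), List.foldl_cons,
    show ((i : Int) + 1) = ((i + 1 : Nat) : Int) by push_cast; ring]

-- a slice end at or past the length is the same as an open end
theorem pvSlice_to_len (cs : List Char) (s b : Int) (hb : (cs.length : Int) ≤ b) :
    PySem.List.slice cs (some s) (some b) = PySem.List.slice cs (some s) none := by
  simp only [PySem.List.slice, PySem.List.clampIdx]
  split_ifs <;> simp_all <;> omega

theorem pvMunch_stop (p : Char → Bool) (cs : List Char) (j : Nat) (h : ¬ j < cs.length) :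
    pvMunch p cs j = j := by
  unfold pvMunch; simp [h]

theorem pvBLoop_stop (cs : List Char) (j : Nat) (h : ¬ j < cs.length) :
    pvBLoop cs j = [] := by
  unfold pvBLoop; simp [h]

-- generic scan lemma: while A's looking_for is `tag` with continuation predicate p, the fold
-- behaves like pvMunch and then resumes clean at the stop position
theorem pvScan (cs : List Char) (tag : String) (p : Char → Bool)
    (hsc : ∀ segs s (j : Nat), 0 < j → j < cs.length →
      pvAStep cs (segs, some tag, s, 0) (j : Int) =
        if p (cs.getD j ' ') then (segs, some tag, s, 0)
        else pvAStep cs (segs ++ [String.ofList (PySem.List.slice cs (some s) (some (j : Int)))], none, s, 0) (j : Int))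
    (i0 : Nat)
    (hclean : ∀ (j : Nat) segs start, i0 < j → pvRunA cs j (segs, none, start, 0) = segs ++ pvBLoop cs j) :
    ∀ (m j : Nat) segs (s : Int), cs.length - j ≤ m → i0 < j →
      pvRunA cs j (segs, some tag, s, 0) =
        segs ++ String.ofList (PySem.List.slice cs (some s) (some ((pvMunch p cs j : Nat) : Int))) ::
          pvBLoop cs (pvMunch p cs j) := by
  intro m
  induction m with
  | zero =>
    intro j segs s hm hj
    have hjn : ¬ j < cs.length := by omega
    rw [pvRunA_stop cs j hjn, pvMunch_stop p cs j hjn, pvBLoop_stop cs j hjn,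
      pvSlice_to_len cs s j (by exact_mod_cast Nat.le_of_not_lt hjn)]
    simp
  | succ m ih =>
    intro j segs s hm hj
    by_cases hjn : j < cs.length
    · rw [pvRunA_cons cs j hjn, hsc segs s j (by omega) hjn]
      by_cases hp : p (cs.getD j ' ') = true
      · rw [if_pos hp]
        have hmj : pvMunch p cs j = pvMunch p cs (j + 1) := by
          conv_lhs => unfold pvMunch
          rw [dif_pos hjn, if_pos (by rwa [List.getD_eq_getElem cs ' ' hjn] at hp)]
        rw [hmj]
        exact ih (j + 1) segs s (by omega) (by omega)
      · rw [if_neg hp]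
        have hmj : pvMunch p cs j = j := by
          conv_lhs => unfold pvMunch
          rw [dif_pos hjn, if_neg (by rwa [List.getD_eq_getElem cs ' ' hjn] at hp)]
        rw [hmj, ← pvRunA_cons cs j hjn, hclean j _ s hj]
        simp
    · rw [pvRunA_stop cs j hjn, pvMunch_stop p cs j hjn, pvBLoop_stop cs j hjn,
        pvSlice_to_len cs s j (by exact_mod_cast Nat.le_of_not_lt hjn)]
      simp

-- the hsc instances for the four scanning states
theorem pvHsc_int (cs : List Char) : ∀ segs s (j : Nat), 0 < j → j < cs.length →
    pvAStep cs (segs, some "int", s, 0) (j : Int) =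
      if (fun d => PySem.Chars.isdigit d || d = '.') (cs.getD j ' ') then (segs, some "int", s, 0)
      else pvAStep cs (segs ++ [String.ofList (PySem.List.slice cs (some s) (some (j : Int)))], none, s, 0) (j : Int) := by
  intro segs s j hj0 hjn
  have hz : ((j : Int)) ≠ 0 := by exact_mod_cast hj0.ne'
  simp only [pvAStep, PySem.List.pyGetD_natCast]
  generalize cs.getD j ' ' = c
  by_cases hd : PySem.Chars.isdigit c = true <;> by_cases hdot : c = '.' <;>
    simp [hd, hdot, hj0.ne']

theorem pvHsc_str (cs : List Char) : ∀ segs s (j : Nat), 0 < j → j < cs.length →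
    pvAStep cs (segs, some "str", s, 0) (j : Int) =
      if PySem.Chars.isalnum (cs.getD j ' ') then (segs, some "str", s, 0)
      else pvAStep cs (segs ++ [String.ofList (PySem.List.slice cs (some s) (some (j : Int)))], none, s, 0) (j : Int) := by
  intro segs s j hj0 hjn
  have hz : ((j : Int)) ≠ 0 := by exact_mod_cast hj0.ne'
  simp only [pvAStep, PySem.List.pyGetD_natCast]
  generalize cs.getD j ' ' = c
  by_cases ha : PySem.Chars.isalnum c = true <;> simp [ha, hj0.ne']

theorem pvHsc_op (cs : List Char) : ∀ segs s (j : Nat), 0 < j → j < cs.length →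
    pvAStep cs (segs, some "operator", s, 0) (j : Int) =
      if (fun d => pvOps.contains d) (cs.getD j ' ') then (segs, some "operator", s, 0)
      else pvAStep cs (segs ++ [String.ofList (PySem.List.slice cs (some s) (some (j : Int)))], none, s, 0) (j : Int) := by
  intro segs s j hj0 hjn
  have hz : ((j : Int)) ≠ 0 := by exact_mod_cast hj0.ne'
  simp only [pvAStep, PySem.List.pyGetD_natCast]
  generalize cs.getD j ' ' = c
  by_cases ho : c ∈ pvOps <;> simp [ho, hj0.ne']

theorem pvHsc_pass (cs : List Char) : ∀ segs s (j : Nat), 0 < j → j < cs.length →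
    pvAStep cs (segs, some "pass", s, 0) (j : Int) =
      if (fun _ => false) (cs.getD j ' ') then (segs, some "pass", s, 0)
      else pvAStep cs (segs ++ [String.ofList (PySem.List.slice cs (some s) (some (j : Int)))], none, s, 0) (j : Int) := by
  intro segs s j hj0 hjn
  have hz : ((j : Int)) ≠ 0 := by exact_mod_cast hj0.ne'
  simp only [pvAStep, PySem.List.pyGetD_natCast]
  generalize cs.getD j ' ' = c
  simp [hj0.ne']

theorem pvMunch_false (cs : List Char) (i : Nat) : pvMunch (fun _ => false) cs i = i := by
  unfold pvMunch; simp

theorem pvClean (cs : List Char) :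
    ∀ (k i : Nat) segs (start : Int), cs.length - i ≤ k →
      pvRunA cs i (segs, none, start, 0) = segs ++ pvBLoop cs i := by
  intro k
  induction k with
  | zero =>
    intro i segs start hm
    have hin : ¬ i < cs.length := by omega
    rw [pvRunA_stop cs i hin, pvBLoop_stop cs i hin]
    simp
  | succ k ih =>
    intro i segs start hm
    by_cases hin : i < cs.length
    · have hclean : ∀ (j : Nat) segs' (start' : Int), i < j →
          pvRunA cs j (segs', none, start', 0) = segs' ++ pvBLoop cs j :=
        fun j segs' start' hj => ih j segs' start' (by omega)
      have hgd : cs.getD i ' ' = cs[i] := List.getD_eq_getElem cs ' ' hin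
      rw [pvRunA_cons cs i hin]
      by_cases h1 : (PySem.Chars.isspace cs[i] = true ∨ cs[i] = ',')
      · have hA : pvAStep cs (segs, none, start, 0) (i : Int) = (segs, none, -1, 0) := by
          simp only [pvAStep, PySem.List.pyGetD_natCast, hgd]
          simp [h1]
        rw [hA, hclean (i + 1) segs (-1) (by omega)]
        conv_rhs => rw [pvBLoop]
        rcases h1 with h1 | h1 <;> simp [hin, h1]
      · push Not at h1
        by_cases h2 : PySem.Chars.isdigit cs[i] = true
        · have hA : pvAStep cs (segs, none, start, 0) (i : Int) = (segs, some "int", (i : Int), 0) := by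
            simp only [pvAStep, PySem.List.pyGetD_natCast, hgd]
            simp [h1, h2]
          rw [hA, pvScan cs "int" (fun d => PySem.Chars.isdigit d || d = '.') (pvHsc_int cs) i hclean
            cs.length (i + 1) segs (i : Int) (by omega) (by omega)]
          conv_rhs => rw [pvBLoop]
          simp [hin, h1, h2]
        · by_cases h3 : (PySem.Chars.isalpha cs[i] = true ∨ cs[i] = '.' ∨ cs[i] = '_')
          · have hA : pvAStep cs (segs, none, start, 0) (i : Int) = (segs, some "str", (i : Int), 0) := by
              simp only [pvAStep, PySem.List.pyGetD_natCast, hgd]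
              simp [h1, h2, h3]
            rw [hA, pvScan cs "str" PySem.Chars.isalnum (pvHsc_str cs) i hclean
              cs.length (i + 1) segs (i : Int) (by omega) (by omega)]
            conv_rhs => rw [pvBLoop]
            rcases h3 with h3 | h3 | h3 <;>
              simp [hin, h1, h2, h3,
                show PySem.Chars.isspace '.' = false from by decide,
                show PySem.Chars.isdigit '.' = false from by decide,
                show PySem.Chars.isspace '_' = false from by decide,
                show PySem.Chars.isdigit '_' = false from by decide]
          · push Not at h3
            by_cases h4 : cs[i] ∈ pvOps
            · have hA : pvAStep cs (segs, none, start, 0) (i : Int) = (segs, some "operator", (i : Int), 0) := by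
                simp only [pvAStep, PySem.List.pyGetD_natCast, hgd]
                simp [h1, h2, h3, h4]
              rw [hA, pvScan cs "operator" (fun d => pvOps.contains d) (pvHsc_op cs) i hclean
                cs.length (i + 1) segs (i : Int) (by omega) (by omega)]
              conv_rhs => rw [pvBLoop]
              simp [hin, h1, h2, h3, h4]
            · have hA : pvAStep cs (segs, none, start, 0) (i : Int) = (segs, some "pass", (i : Int), 0) := by
                simp only [pvAStep, PySem.List.pyGetD_natCast, hgd]
                simp [h1, h2, h3, h4]
              rw [hA, pvScan cs "pass" (fun _ => false) (pvHsc_pass cs) i hclean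
                cs.length (i + 1) segs (i : Int) (by omega) (by omega), pvMunch_false cs (i + 1)]
              conv_rhs => rw [pvBLoop]
              simp [hin, h1, h2, h3, h4]
    · rw [pvRunA_stop cs i hin, pvBLoop_stop cs i hin]
      simp

-- ===== VERDICT (by name: the statement is the Claim_ definition above) =====
theorem divide_into_segments_spec : Claim_equal_divide_into_segments := by
  intro s _
  unfold Spec_divide_into_segments divide_into_segments divide_into_segments_alt
  have h := pvClean s.toList s.toList.length 0 [] (-1) (by omega)
  simpa [pvRunA] using h
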